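-- pv_equiv track=rewrite | github.com/dannya951/handshake | server.py | condense_intervals
-- ===== SOURCE A (Python) =====
-- def condense_intervals(intervals):  # only exists to conform current intervals to same format as old intervals
--     element_placeholder = None
--     new_condensed_interval = []
--     for interval in intervals:
--         if element_placeholder is None:
--             element_placeholder = interval
--         else:
--             previous_name_state = element_placeholder[0]
--             this_element_name_state = interval[0]
--             if previous_name_state == this_element_name_state:
--                 element_placeholder = [this_element_name_state, element_placeholder[1], interval[2]]
--             else:
--                 new_condensed_interval.append(element_placeholder)
--                 element_placeholder = interval
--     if element_placeholder is not None:
--         new_condensed_interval.append(element_placeholder)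
--     return new_condensed_interval
-- ===== SOURCE B (Python) =====
-- def condense_intervals(intervals):
--     result = []
--     i, n = 0, len(intervals)
--     while i < n:
--         name = intervals[i][0]
--         j = i + 1
--         while j < n and intervals[j][0] == name:
--             j += 1
--         if j == i + 1:
--             result.append(intervals[i])
--         else:
--             result.append([name, intervals[i][1], intervals[j - 1][2]])
--         i = j
--     return result
-- ===== Notes on version B (the rewrite author's own statement) =====
-- stated objective: alternative
-- what changed: Replaces A's placeholder/flush state machine with a two-pointer scan that finds each maximal run of equal-name intervals and emits its summary (or the original singleton) directly.
-- outside the precondition, e.g. on condense_intervals([[]]): A returns [[]], B raises IndexError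
import Mathlib
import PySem

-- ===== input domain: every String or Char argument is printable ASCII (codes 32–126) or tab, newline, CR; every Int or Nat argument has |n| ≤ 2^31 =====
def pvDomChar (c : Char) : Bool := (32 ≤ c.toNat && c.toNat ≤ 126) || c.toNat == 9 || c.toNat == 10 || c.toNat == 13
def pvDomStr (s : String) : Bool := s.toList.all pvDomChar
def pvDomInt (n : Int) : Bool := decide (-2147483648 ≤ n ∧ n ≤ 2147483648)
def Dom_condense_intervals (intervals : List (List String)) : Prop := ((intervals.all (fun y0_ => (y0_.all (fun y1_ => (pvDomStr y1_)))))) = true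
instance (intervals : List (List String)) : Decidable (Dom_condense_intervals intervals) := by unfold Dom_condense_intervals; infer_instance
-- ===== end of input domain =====

-- B replaces A's placeholder/flush state machine with a direct scan over maximal runs of
-- equal-name intervals (alternative decomposition, same cost). Return values only; no mutation.

-- ===== PORT A =====
-- one loop iteration of A: state = (element_placeholder, new_condensed_interval)
def aStep (st : Option (List String) × List (List String)) (interval : List String) :
    Option (List String) × List (List String) :=
  match st with
  | (none, acc) => (some interval, acc)
  | (some ph, acc) =>
      if ph.headD "" = interval.headD "" then
        (some [interval.headD "", ph.getD 1 "", interval.getD 2 ""], acc)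
      else
        (some interval, acc ++ [ph])

def condense_intervals (intervals : List (List String)) : List (List String) :=
  match intervals.foldl aStep (none, []) with
  | (none, acc) => acc
  | (some ph, acc) => acc ++ [ph]

-- ===== PORT B =====
-- B scans the leading maximal run of intervals sharing the first interval's name
-- (the inner `while` of Source B), emits the singleton or the merged triple, and continues
-- after the run.
def condense_intervals_alt : List (List String) → List (List String)
  | [] => []
  | iv :: rest =>
      (if (rest.takeWhile (fun jv => jv.headD "" == iv.headD "")).isEmpty then iv
       else [iv.headD "", iv.getD 1 "",
             ((rest.takeWhile (fun jv => jv.headD "" == iv.headD "")).getLastD []).getD 2 ""])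
      :: condense_intervals_alt (rest.dropWhile (fun jv => jv.headD "" == iv.headD ""))
  termination_by l => l.length
  decreasing_by
    simp only [List.length_cons]
    exact Nat.lt_succ_of_le (List.length_dropWhile_le _ _)

-- ===== PRECONDITION & SPEC =====
-- Pre_ excludes exactly the inputs where the Python A raises IndexError (an empty interval
-- next to another interval, or adjacent equal-name intervals too short to merge) plus the
-- one-element list whose single interval is empty, which A returns unchanged only because
-- it never reads that interval while B's indexing raises there.
def Pre_condense_intervals (intervals : List (List String)) : Prop :=
  (∀ iv ∈ intervals, iv ≠ []) ∧
  (∀ ab ∈ intervals.zip intervals.tail,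
    ab.1.headD "" = ab.2.headD "" → 2 ≤ ab.1.length ∧ 3 ≤ ab.2.length)
instance (intervals : List (List String)) : Decidable (Pre_condense_intervals intervals) := by
  unfold Pre_condense_intervals; infer_instance

def pvWitness_condense_intervals : List (List String) :=
  [["a", "1", "2"], ["a", "3", "4"], ["b", "5", "6"]]

def Spec_condense_intervals (intervals : List (List String)) (out : List (List String)) : Prop := out = condense_intervals_alt intervals
instance (intervals : List (List String)) (out : List (List String)) : Decidable (Spec_condense_intervals intervals out) := by unfold Spec_condense_intervals; infer_instance

-- ===== CLAIM (what is proved, stated in full; the proofs are below) =====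
def Claim_equal_condense_intervals : Prop := ∀ (intervals : List (List String)), Dom_condense_intervals intervals → Pre_condense_intervals intervals → Spec_condense_intervals intervals (condense_intervals intervals)

-- ===== LEMMAS AND PROOFS =====

-- A's repeated merging of a run into the placeholder
def mergeAll (ph : List String) : List (List String) → List String
  | [] => ph
  | r :: rs => mergeAll [r.headD "", ph.getD 1 "", r.getD 2 ""] rs

def finishA (st : Option (List String) × List (List String)) : List (List String) :=
  match st with
  | (none, acc) => acc
  | (some ph, acc) => acc ++ [ph]

lemma foldl_run (run : List (List String)) (name : String) :
    ∀ (ph : List String) (acc : List (List String)), ph.headD "" = name →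
    (∀ r ∈ run, r.headD "" = name) →
    List.foldl aStep (some ph, acc) run = (some (mergeAll ph run), acc) := by
  induction run with
  | nil => intro ph acc _ _; simp [mergeAll]
  | cons r rs ih =>
      intro ph acc hph h
      have hr : r.headD "" = name := h r (by simp)
      simp only [List.foldl, aStep, mergeAll]
      rw [if_pos (hph.trans hr.symm)]
      exact ih _ _ (by simpa using hr) (fun x hx => h x (by simp [hx]))

lemma mergeAll_head (run : List (List String)) (name : String) :
    ∀ (ph : List String), ph.headD "" = name →
    (∀ r ∈ run, r.headD "" = name) →
    (mergeAll ph run).headD "" = name := by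
  induction run with
  | nil => intro ph hph _; simpa [mergeAll] using hph
  | cons r rs ih =>
      intro ph hph h
      have hr : r.headD "" = name := h r (by simp)
      simp only [mergeAll]
      exact ih _ (by simpa using hr) (fun x hx => h x (by simp [hx]))

lemma mergeAll_eq (run : List (List String)) (name : String) : run ≠ [] →
    ∀ (ph : List String), ph.headD "" = name →
    (∀ r ∈ run, r.headD "" = name) →
    mergeAll ph run = [name, ph.getD 1 "", (run.getLastD []).getD 2 ""] := by
  induction run with
  | nil => intro hne; exact absurd rfl hne
  | cons r rs ih =>
      intro _ ph hph h
      have hr : r.headD "" = name := h r (by simp)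
      cases rs with
      | nil =>
          simp only [mergeAll]
          rw [hr]
          simp
      | cons s ss =>
          rw [show mergeAll ph (r :: s :: ss)
                = mergeAll [r.headD "", ph.getD 1 "", r.getD 2 ""] (s :: ss) from rfl,
             ih (by simp) _ (by simpa using hr) (fun x hx => h x (by simp [hx]))]
          simp

lemma dropWhile_head_false {α : Type} (p : α → Bool) (l : List α) (h t : _)
    (heq : l.dropWhile p = h :: t) : p h = false := by
  induction l with
  | nil => simp at heq
  | cons x xs ih =>
      by_cases hx : p x
      · rw [List.dropWhile_cons_of_pos hx] at heq; exact ih heq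
      · rw [List.dropWhile_cons_of_neg hx] at heq
        cases heq; simpa using hx

lemma finishA_run (n : Nat) : ∀ (rest : List (List String)) (ph : List String)
    (acc : List (List String)), rest.length ≤ n →
    finishA (List.foldl aStep (some ph, acc) rest) = acc ++ condense_intervals_alt (ph :: rest) := by
  induction n with
  | zero =>
      intro rest ph acc h
      have : rest = [] := List.eq_nil_of_length_eq_zero (Nat.le_zero.mp h)
      subst this
      simp [condense_intervals_alt, finishA]
  | succ n ih =>
      intro rest ph acc h
      set p : List String → Bool := fun jv => jv.headD "" == ph.headD "" with hp
      have hsplit : rest.takeWhile p ++ rest.dropWhile p = rest := List.takeWhile_append_dropWhile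
      have hrun : ∀ r ∈ rest.takeWhile p, r.headD "" = ph.headD "" := by
        intro r hr
        have := List.mem_takeWhile_imp hr
        simpa [hp] using this
      have hfold : List.foldl aStep (some ph, acc) rest
          = List.foldl aStep (some (mergeAll ph (rest.takeWhile p)), acc) (rest.dropWhile p) := by
        conv_lhs => rw [← hsplit]
        rw [List.foldl_append, foldl_run _ (ph.headD "") _ _ rfl hrun]
      have hmhead : (mergeAll ph (rest.takeWhile p)).headD "" = ph.headD "" :=
        mergeAll_head _ _ _ rfl hrun
      have hheadeq : (if (rest.takeWhile p).isEmpty then ph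
          else [ph.headD "", ph.getD 1 "", ((rest.takeWhile p).getLastD []).getD 2 ""])
          = mergeAll ph (rest.takeWhile p) := by
        by_cases he : (rest.takeWhile p).isEmpty
        · have : rest.takeWhile p = [] := List.isEmpty_iff.mp he
          simp [this, mergeAll]
        · have hne : rest.takeWhile p ≠ [] := by
            intro hc; exact he (by simp [hc])
          rw [mergeAll_eq _ _ hne _ rfl hrun]
          simp [he]
      have haltu : condense_intervals_alt (ph :: rest)
          = (if (rest.takeWhile p).isEmpty then ph
             else [ph.headD "", ph.getD 1 "", ((rest.takeWhile p).getLastD []).getD 2 ""])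
            :: condense_intervals_alt (rest.dropWhile p) := by
        rw [condense_intervals_alt]
      cases hdrop : rest.dropWhile p with
      | nil =>
          rw [hfold, hdrop]
          simp only [List.foldl_nil, finishA, haltu, hdrop]
          rw [hheadeq]
          simp [condense_intervals_alt]
      | cons hh tt =>
          have hph : hh.headD "" ≠ ph.headD "" := by
            have := dropWhile_head_false p rest hh tt hdrop
            simpa [hp] using this
          have hstep : aStep (some (mergeAll ph (rest.takeWhile p)), acc) hh
              = (some hh, acc ++ [mergeAll ph (rest.takeWhile p)]) := by
            simp only [aStep]
            rw [if_neg (by rw [hmhead]; exact fun hc => hph hc.symm)]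
          have htlen : tt.length ≤ n := by
            have h1 : (rest.dropWhile p).length ≤ rest.length := List.length_dropWhile_le _ _
            rw [hdrop] at h1
            simp only [List.length_cons] at h1
            omega
          rw [hfold, hdrop]
          simp only [List.foldl_cons, hstep]
          rw [ih tt hh (acc ++ [mergeAll ph (rest.takeWhile p)]) htlen]
          rw [haltu, hdrop, hheadeq]
          simp

-- ===== VERDICT (by name: the statement is the Claim_ definition above) =====
theorem condense_intervals_spec : Claim_equal_condense_intervals := by
  intro intervals _ _
  unfold Spec_condense_intervals condense_intervals
  cases intervals with
  | nil => simp [condense_intervals_alt]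
  | cons iv rest =>
      have : List.foldl aStep (none, []) (iv :: rest) = List.foldl aStep (some iv, []) rest := by
        simp [List.foldl, aStep]
      rw [this]
      have := finishA_run rest.length rest iv [] (le_refl _)
      simpa [finishA] using this
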